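-- pv_equiv track=rewrite | github.com/ManuelGurbanov/parcial-python-elecciones | parcial.py | acomodar
-- ===== SOURCE A (Python) =====
-- def acomodar(lista:list[str]) -> list[str]:
--     res:list[str] = [];
--     lla:list[str] = [];
--     up:list[str] = [];
--
--     for element in lista:
--         if (element == "LLA"):
--             lla.append(element);
--         elif (element == "UP"):
--             up.append(element);
--
--     for element in up:
--         res.append(element);
--     for element in lla:
--         res.append(element);
--     return res;
-- ===== SOURCE B (Python) =====
-- def acomodar(lista: list[str]) -> list[str]:
--     up = lista.count("UP")
--     lla = lista.count("LLA")
--     return ["UP"] * up + ["LLA"] * lla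
-- ===== Notes on version B (the rewrite author's own statement) =====
-- stated objective: simpler
-- what changed: B counts occurrences of 'UP' and 'LLA' once and reconstructs the result with list multiplication/concatenation, instead of building two intermediate lists by appending and then copying them element by element into the result.
import Mathlib
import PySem

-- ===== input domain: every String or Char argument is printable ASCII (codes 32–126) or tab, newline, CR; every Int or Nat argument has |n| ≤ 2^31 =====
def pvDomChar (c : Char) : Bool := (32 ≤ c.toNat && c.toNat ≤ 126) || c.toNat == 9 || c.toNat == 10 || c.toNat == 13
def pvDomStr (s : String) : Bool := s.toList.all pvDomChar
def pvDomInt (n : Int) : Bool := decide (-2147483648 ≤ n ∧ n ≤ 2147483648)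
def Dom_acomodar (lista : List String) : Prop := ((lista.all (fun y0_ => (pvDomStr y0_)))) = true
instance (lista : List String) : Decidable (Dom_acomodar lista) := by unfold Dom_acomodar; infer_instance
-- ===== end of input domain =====

-- B replaces A's filter-and-append loops by two counts and a replicate-based reconstruction (simpler decomposition, same O(n)).

-- ===== PORT A =====
-- first loop: partition appends into (lla, up); then two copy loops into res
def acomodar (lista : List String) : List String :=
  let p := lista.foldl
    (fun (acc : List String × List String) element =>
      if element == "LLA" then (acc.1 ++ [element], acc.2)
      else if element == "UP" then (acc.1, acc.2 ++ [element])
      else acc) ([], [])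
  let res := p.2.foldl (fun r element => r ++ [element]) []
  let res := p.1.foldl (fun r element => r ++ [element]) res
  res

-- ===== PORT B =====
def acomodar_alt (lista : List String) : List String :=
  let up := PySem.List.count lista "UP"
  let lla := PySem.List.count lista "LLA"
  List.replicate up "UP" ++ List.replicate lla "LLA"

-- ===== PRECONDITION & SPEC =====
def Spec_acomodar (lista : List String) (out : List String) : Prop := out = acomodar_alt lista
instance (lista : List String) (out : List String) : Decidable (Spec_acomodar lista out) := by unfold Spec_acomodar; infer_instance

-- ===== CLAIM (what is proved, stated in full; the proofs are below) =====
def Claim_equal_acomodar : Prop := ∀ (lista : List String), Dom_acomodar lista → Spec_acomodar lista (acomodar lista)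

-- ===== LEMMAS AND PROOFS =====

theorem pv_copy_loop (l init : List String) :
    l.foldl (fun r element => r ++ [element]) init = init ++ l := by
  induction l generalizing init with
  | nil => simp
  | cons x xs ih => simp [List.foldl, ih]

theorem pv_cons_replicate (n : Nat) (a : String) :
    a :: List.replicate n a = List.replicate n a ++ [a] := by
  rw [← List.replicate_succ, List.replicate_succ']

theorem pv_partition_loop (l : List String) (acc : List String × List String) :
    l.foldl
      (fun (acc : List String × List String) element =>
        if element == "LLA" then (acc.1 ++ [element], acc.2)
        else if element == "UP" then (acc.1, acc.2 ++ [element])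
        else acc) acc
    = (acc.1 ++ List.replicate (l.count "LLA") "LLA",
       acc.2 ++ List.replicate (l.count "UP") "UP") := by
  induction l generalizing acc with
  | nil => simp
  | cons x xs ih =>
    simp only [List.foldl_cons]
    by_cases h1 : (x == "LLA") = true
    · rw [if_pos h1, ih]
      have hx : x = "LLA" := beq_iff_eq.mp h1
      subst hx
      simp [List.count_cons, List.replicate_succ', pv_cons_replicate]
    · rw [if_neg h1]
      by_cases h2 : (x == "UP") = true
      · rw [if_pos h2, ih]
        have hx : x = "UP" := beq_iff_eq.mp h2
        subst hx
        have hne : ¬ ("UP" : String) = "LLA" := by decide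
        simp [List.count_cons, List.replicate_succ', hne, pv_cons_replicate]
      · rw [if_neg h2, ih]
        have hx1 : ¬ x = "LLA" := by simpa using h1
        have hx2 : ¬ x = "UP" := by simpa using h2
        simp [List.count_cons, hx1, hx2]

-- ===== VERDICT (by name: the statement is the Claim_ definition above) =====
theorem acomodar_spec : Claim_equal_acomodar := by
  intro lista _
  show acomodar lista = acomodar_alt lista
  unfold acomodar acomodar_alt
  simp only [pv_partition_loop, pv_copy_loop, PySem.List.count_eq, List.nil_append]
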